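-- pv_equiv track=rewrite | github.com/MarcinScieszka/code-wars-solutions | 001 - Take a Ten Minute Walk.py | is_valid_walk_0
-- ===== SOURCE A (Python) =====
-- def is_valid_walk_0(walk):
--     if len(walk) != 10:
--         # walk is shorter/longer than 10 minutes
--         return False
--
--     x_coordinate = 0
--     y_coordinate = 0
--
--     for direction in walk:
--         if direction == 'n':
--             x_coordinate += 1
--         elif direction == 's':
--             x_coordinate -= 1
--         elif direction == 'w':
--             y_coordinate += 1
--         elif direction == 'e':
--             y_coordinate -= 1
--
--     if (not x_coordinate) and (not y_coordinate):
--         # x and y are in the original position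
--         return True
--     else:
--         return False
-- ===== SOURCE B (Python) =====
-- def is_valid_walk_0(walk):
--     if len(walk) != 10:
--         return False
--     return walk.count('n') == walk.count('s') and walk.count('w') == walk.count('e')
-- ===== Notes on version B (the rewrite author's own statement) =====
-- stated objective: simpler
-- what changed: Replaces the per-element branch loop accumulating x/y coordinates with direct count comparisons: n's must equal s's and w's must equal e's.
import Mathlib
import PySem

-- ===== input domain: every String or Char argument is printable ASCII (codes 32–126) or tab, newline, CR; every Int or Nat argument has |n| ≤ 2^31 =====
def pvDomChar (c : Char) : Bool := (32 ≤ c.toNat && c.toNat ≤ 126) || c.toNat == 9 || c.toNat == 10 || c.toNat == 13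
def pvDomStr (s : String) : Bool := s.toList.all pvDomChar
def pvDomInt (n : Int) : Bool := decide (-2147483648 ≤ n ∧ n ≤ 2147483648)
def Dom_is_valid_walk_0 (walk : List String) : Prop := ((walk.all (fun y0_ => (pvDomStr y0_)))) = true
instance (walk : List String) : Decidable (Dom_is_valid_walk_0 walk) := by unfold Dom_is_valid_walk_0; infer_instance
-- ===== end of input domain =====

-- B replaces A's coordinate-accumulating branch loop with direct count comparisons (simpler).

-- ===== PORT A =====
-- loop body of A
def pvStep (st : Int × Int) (direction : String) : Int × Int :=
  if direction == "n" then (st.1 + 1, st.2)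
  else if direction == "s" then (st.1 - 1, st.2)
  else if direction == "w" then (st.1, st.2 + 1)
  else if direction == "e" then (st.1, st.2 - 1)
  else st

def is_valid_walk_0 (walk : List String) : Bool :=
  if walk.length ≠ 10 then false
  else
    let p := walk.foldl pvStep (0, 0)
    if p.1 = 0 ∧ p.2 = 0 then true else false

-- ===== PORT B =====
def is_valid_walk_0_alt (walk : List String) : Bool :=
  if walk.length ≠ 10 then false
  else (walk.count "n" == walk.count "s") && (walk.count "w" == walk.count "e")

-- ===== PRECONDITION & SPEC =====
def Spec_is_valid_walk_0 (walk : List String) (out : Bool) : Prop := out = is_valid_walk_0_alt walk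
instance (walk : List String) (out : Bool) : Decidable (Spec_is_valid_walk_0 walk out) := by unfold Spec_is_valid_walk_0; infer_instance

-- ===== CLAIM (what is proved, stated in full; the proofs are below) =====
def Claim_equal_is_valid_walk_0 : Prop := ∀ (walk : List String), Dom_is_valid_walk_0 walk → Spec_is_valid_walk_0 walk (is_valid_walk_0 walk)

-- ===== LEMMAS AND PROOFS =====

-- The loop's accumulators equal (start + #n − #s, start + #w − #e).
theorem pv_fold_counts (l : List String) (x y : Int) :
    l.foldl pvStep (x, y)
    = (x + (l.count "n" : Int) - (l.count "s" : Int),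
       y + (l.count "w" : Int) - (l.count "e" : Int)) := by
  induction l generalizing x y with
  | nil => simp
  | cons h t ih =>
    rw [List.foldl_cons, pvStep]
    by_cases hn : h = "n"
    · simp [hn, ih, List.count_cons]; omega
    · by_cases hs : h = "s"
      · simp [hn, hs, ih, List.count_cons]; omega
      · by_cases hw : h = "w"
        · simp [hn, hs, hw, ih, List.count_cons]; omega
        · by_cases he : h = "e"
          · simp [hn, hs, hw, he, ih, List.count_cons]; omega
          · simp [hn, hs, hw, he, ih, List.count_cons]

-- ===== VERDICT (by name: the statement is the Claim_ definition above) =====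
theorem is_valid_walk_0_spec : Claim_equal_is_valid_walk_0 := by
  intro walk _
  unfold Spec_is_valid_walk_0 is_valid_walk_0 is_valid_walk_0_alt
  by_cases hl : walk.length ≠ 10
  · simp [hl]
  · simp only [hl, if_false]
    rw [pv_fold_counts]
    simp only [zero_add]
    rcases Bool.eq_false_or_eq_true ((walk.count "n" == walk.count "s") && (walk.count "w" == walk.count "e")) with hb | hb
      <;> rw [hb] <;> simp_all <;> omega
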